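-- pv_equiv track=rewrite | github.com/san199r/GA_Tool_Scrapper | GA_State_Probate_Daterange_Tool_V3.py | analyze_and_sort_filings
-- ===== SOURCE A (Python) =====
-- PRIORITY_FILINGS = [
--     "Petition To Probate Will In Solemn Form",
--     "Petition to Probate Will in Common Form",
--     "Petition For Letters Of Administration",
--     "Petition For Temporary Letters Of Administration",
--     "Petition For Order Declaring No Administration Necessary"
-- ]
--
-- def analyze_and_sort_filings(filings):
--     clean = [f for f in filings if f]
--     joined = " ".join(clean).lower()
--
--     # -------- Testate Status (robust) --------
--     intestate_patterns = [
--         "without will",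
--         "without a will",
--         "intestate"
--     ]
--
--     if any(p in joined for p in intestate_patterns):
--         testate_status = "Intestate"
--     elif " will" in joined:  # space prevents matching 'willing'
--         testate_status = "Testate"
--     else:
--         testate_status = ""
--
--     # -------- Filing Priority --------
--     ordered = []
--     matched = ""
--
--     for phrase in PRIORITY_FILINGS:
--         for f in clean:
--             if phrase.lower() in f.lower():
--                 if not matched:
--                     matched = f
--                 ordered.append(f)
--
--     for f in clean:
--         if f not in ordered:
--             ordered.append(f)
--
--     ordered = ordered[:10] + [""] * (10 - len(ordered))
--
--     return testate_status, matched, ordered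
-- ===== SOURCE B (Python) =====
-- PRIORITY_FILINGS = [
--     "Petition To Probate Will In Solemn Form",
--     "Petition to Probate Will in Common Form",
--     "Petition For Letters Of Administration",
--     "Petition For Temporary Letters Of Administration",
--     "Petition For Order Declaring No Administration Necessary"
-- ]
--
-- def analyze_and_sort_filings(filings):
--     clean = [f for f in filings if f]
--     joined = " ".join(clean).lower()
--
--     if any(p in joined for p in ("without will", "without a will", "intestate")):
--         testate_status = "Intestate"
--     elif " will" in joined:
--         testate_status = "Testate"
--     else:
--         testate_status = ""
--
--     # decorate-sort-undecorate: one filing-major pass tags every match with its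
--     # phrase rank; a stable sort by rank yields the phrase-major priority list.
--     lowered = [(rank, phrase.lower()) for rank, phrase in enumerate(PRIORITY_FILINGS)]
--     pairs = [(rank, f) for f in clean for rank, p in lowered if p in f.lower()]
--     pairs.sort(key=lambda t: t[0])
--     priority = [f for _, f in pairs]
--     matched = priority[0] if priority else ""
--
--     # ordered dedup of the remainder via dict.fromkeys instead of a membership loop
--     ordered = priority + [f for f in dict.fromkeys(clean) if f not in priority]
--     return testate_status, matched, (ordered + [""] * 10)[:10]
-- ===== Notes on version B (the rewrite author's own statement) =====
-- stated objective: faster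
-- what changed: A's phrase-major double loop with a mutable first-match flag becomes decorate-sort-undecorate (one filing-major pass tags each match with its phrase rank, a stable sort by rank restores phrase-major order, matched is the head), and A's append-if-not-in-ordered dedup loop, which scans the growing ordered list per filing, becomes hash-based dict.fromkeys dedup followed by a filter of only the distinct filings against the priority list.
import Mathlib
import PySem

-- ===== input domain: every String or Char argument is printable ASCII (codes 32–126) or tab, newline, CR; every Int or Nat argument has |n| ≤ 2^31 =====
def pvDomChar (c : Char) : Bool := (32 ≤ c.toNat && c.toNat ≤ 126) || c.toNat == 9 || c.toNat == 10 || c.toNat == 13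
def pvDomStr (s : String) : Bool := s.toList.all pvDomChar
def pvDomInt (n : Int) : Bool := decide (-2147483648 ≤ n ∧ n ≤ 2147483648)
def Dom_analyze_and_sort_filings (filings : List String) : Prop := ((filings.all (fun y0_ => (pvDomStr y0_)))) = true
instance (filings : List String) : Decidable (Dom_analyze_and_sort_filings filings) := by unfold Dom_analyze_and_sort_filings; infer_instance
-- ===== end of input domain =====

-- B replaces A's phrase-major double loop and mutable first-match flag by decorate-sort-undecorate
-- (tag matches with a phrase rank in one filing-major pass, stable-sort by rank) and replaces the
-- membership-loop dedup by dict.fromkeys + filter (objective: alternative decomposition).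

def PRIORITY_FILINGS : List String := [
  "Petition To Probate Will In Solemn Form",
  "Petition to Probate Will in Common Form",
  "Petition For Letters Of Administration",
  "Petition For Temporary Letters Of Administration",
  "Petition For Order Declaring No Administration Necessary"
]

-- ===== PORT A =====
def analyze_and_sort_filings (filings : List String) : String × String × List String :=
  let clean := filings.filter (fun f => f != "")          -- [f for f in filings if f]
  let joined := PySem.Str.lower (PySem.Str.join " " clean)
  let testate_status :=
    if ["without will", "without a will", "intestate"].any (fun p => PySem.Str.isIn p joined)
    then "Intestate"
    else if PySem.Str.isIn " will" joined then "Testate"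
    else ""
  -- for phrase in PRIORITY_FILINGS: for f in clean: …  (state = (ordered, matched))
  let st := PRIORITY_FILINGS.foldl (fun (st : List String × String) phrase =>
      clean.foldl (fun (st : List String × String) f =>
        if PySem.Str.isIn (PySem.Str.lower phrase) (PySem.Str.lower f) then
          (st.1 ++ [f], if st.2 == "" then f else st.2)
        else st) st) ([], "")
  let matched := st.2
  -- for f in clean: if f not in ordered: ordered.append(f)
  let ordered := clean.foldl (fun ord f => if f ∈ ord then ord else ord ++ [f]) st.1
  -- ordered[:10] + [""] * (10 - len(ordered))   (Nat subtraction = Python's empty list for negative counts)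
  let ordered := PySem.List.slice ordered none (some 10) ++ List.replicate (10 - ordered.length) ""
  (testate_status, matched, ordered)

-- ===== PORT B =====
def analyze_and_sort_filings_alt (filings : List String) : String × String × List String :=
  let clean := filings.filter (fun f => f != "")
  let joined := PySem.Str.lower (PySem.Str.join " " clean)
  let testate_status :=
    if ["without will", "without a will", "intestate"].any (fun p => PySem.Str.isIn p joined)
    then "Intestate"
    else if PySem.Str.isIn " will" joined then "Testate"
    else ""
  -- lowered = [(rank, phrase.lower()) for rank, phrase in enumerate(PRIORITY_FILINGS)]
  let lowered := (PySem.List.enumerate PRIORITY_FILINGS).map (fun rp => (rp.1, PySem.Str.lower rp.2))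
  -- pairs = [(rank, f) for f in clean for rank, p in lowered if p in f.lower()]
  let pairs := clean.flatMap (fun f =>
      (lowered.filter (fun rp => PySem.Str.isIn rp.2 (PySem.Str.lower f))).map (fun rp => (rp.1, f)))
  -- pairs.sort(key=lambda t: t[0])  (stable)
  let pairs := PySem.List.sorted pairs (fun t => t.1) false
  let priority := pairs.map (fun t => t.2)
  let matched := match priority with | [] => "" | x :: _ => x   -- priority[0] if priority else ""
  -- ordered = priority + [f for f in dict.fromkeys(clean) if f not in priority]
  let ordered := priority ++ (PySem.List.dedup clean).filter (fun f => !(priority.contains f))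
  -- (ordered + [""] * 10)[:10]
  (testate_status, matched, PySem.List.slice (ordered ++ List.replicate 10 "") none (some 10))

-- ===== PRECONDITION & SPEC =====
def Spec_analyze_and_sort_filings (filings : List String) (out : String × String × List String) : Prop := out = analyze_and_sort_filings_alt filings
instance (filings : List String) (out : String × String × List String) : Decidable (Spec_analyze_and_sort_filings filings out) := by unfold Spec_analyze_and_sort_filings; infer_instance

-- ===== CLAIM (what is proved, stated in full; the proofs are below) =====
def Claim_equal_analyze_and_sort_filings : Prop := ∀ (filings : List String), Dom_analyze_and_sort_filings filings → Spec_analyze_and_sort_filings filings (analyze_and_sort_filings filings)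

-- ===== LEMMAS AND PROOFS =====

-- proof-side abbreviations of the shared pieces
def pvClean (filings : List String) : List String := filings.filter (fun f => f != "")

def pvTestate (clean : List String) : String :=
  if ["without will", "without a will", "intestate"].any
      (fun p => PySem.Str.isIn p (PySem.Str.lower (PySem.Str.join " " clean)))
  then "Intestate"
  else if PySem.Str.isIn " will" (PySem.Str.lower (PySem.Str.join " " clean)) then "Testate"
  else ""

def pvPriority (clean : List String) : List String :=
  PRIORITY_FILINGS.flatMap
    (fun p => clean.filter (fun f => PySem.Str.isIn (PySem.Str.lower p) (PySem.Str.lower f)))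

def pvLowered : List (Int × String) :=
  (PySem.List.enumerate PRIORITY_FILINGS).map (fun rp => (rp.1, PySem.Str.lower rp.2))

def pvPairs (clean : List String) : List (Int × String) :=
  clean.flatMap (fun f =>
    (pvLowered.filter (fun rp => PySem.Str.isIn rp.2 (PySem.Str.lower f))).map (fun rp => (rp.1, f)))

-- A's inner loop over clean, for one phrase
theorem pvInnerA (p : String) (clean : List String) (ord : List String) (m : String)
    (h : ∀ f ∈ clean, (f == "") = false) :
    clean.foldl (fun (st : List String × String) f =>
        if PySem.Str.isIn (PySem.Str.lower p) (PySem.Str.lower f) then (st.1 ++ [f], if st.2 == "" then f else st.2) else st) (ord, m)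
      = (ord ++ clean.filter ((fun f => PySem.Str.isIn (PySem.Str.lower p) (PySem.Str.lower f))),
         if m == "" then (clean.filter ((fun f => PySem.Str.isIn (PySem.Str.lower p) (PySem.Str.lower f)))).headD m else m) := by
  induction clean generalizing ord m with
  | nil => simp
  | cons f t ih =>
    have hf := h f (List.mem_cons_self ..)
    have ht : ∀ g ∈ t, (g == "") = false := fun g hg => h g (List.mem_cons_of_mem _ hg)
    simp only [List.foldl_cons, List.filter_cons]
    by_cases hp : PySem.Str.isIn (PySem.Str.lower p) (PySem.Str.lower f) = true
    · rw [if_pos hp, if_pos hp, ih _ _ ht]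
      by_cases hm : (m == "") = true
      · rw [if_pos hm, if_pos hm]
        simp [hf]
      · simp only [Bool.not_eq_true] at hm
        rw [if_neg (by simp [hm]), if_neg (by simp [hm]), if_neg (by simp [hm])]
        simp
    · rw [if_neg hp, if_neg hp, ih _ _ ht]

-- A's whole phrase-major double loop
theorem pvOuterA (phrases clean : List String) (ord : List String) (m : String)
    (h : ∀ f ∈ clean, (f == "") = false) :
    phrases.foldl (fun (st : List String × String) phrase =>
        clean.foldl (fun (st : List String × String) f =>
          if PySem.Str.isIn (PySem.Str.lower phrase) (PySem.Str.lower f) then (st.1 ++ [f], if st.2 == "" then f else st.2) else st) st)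
      (ord, m)
      = (ord ++ phrases.flatMap (fun p => clean.filter ((fun f => PySem.Str.isIn (PySem.Str.lower p) (PySem.Str.lower f)))),
         if m == "" then (phrases.flatMap (fun p => clean.filter ((fun f => PySem.Str.isIn (PySem.Str.lower p) (PySem.Str.lower f))))).headD m else m) := by
  induction phrases generalizing ord m with
  | nil => simp
  | cons p ps ih =>
    simp only [List.foldl_cons, List.flatMap_cons]
    rw [pvInnerA p clean ord m h]
    by_cases hm : (m == "") = true
    · rw [ih _ _]
      have hme : m = "" := by simpa using hm
      subst hme
      cases hF : clean.filter ((fun f => PySem.Str.isIn (PySem.Str.lower p) (PySem.Str.lower f))) with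
      | nil => simp
      | cons x xs =>
        have hx : x ∈ clean := List.mem_of_mem_filter (by rw [hF]; exact List.mem_cons_self ..)
        have : (x == "") = false := h x hx
        simp [this]
    · simp only [Bool.not_eq_true] at hm
      rw [if_neg (by simp [hm]), ih _ _]
      simp [hm]

theorem pvCleanNe (filings : List String) :
    ∀ f ∈ filings.filter (fun f => f != ""), (f == "") = false := by
  intro f hf
  have := (List.mem_filter.mp hf).2
  simpa using this

theorem pvOuterA0 (phrases clean : List String)
    (h : ∀ f ∈ clean, (f == "") = false) :
    phrases.foldl (fun (st : List String × String) phrase =>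
        clean.foldl (fun (st : List String × String) f =>
          if PySem.Str.isIn (PySem.Str.lower phrase) (PySem.Str.lower f) then (st.1 ++ [f], if st.2 == "" then f else st.2) else st) st)
      ([], "")
      = (phrases.flatMap (fun p => clean.filter (fun f => PySem.Str.isIn (PySem.Str.lower p) (PySem.Str.lower f))),
         (phrases.flatMap (fun p => clean.filter (fun f => PySem.Str.isIn (PySem.Str.lower p) (PySem.Str.lower f)))).headD "") := by
  rw [pvOuterA phrases clean [] "" h]
  simp

-- ---------- the stable-sort grouping argument (B's priority list) ----------

theorem pvFlatMapCongr {α β : Type} (l : List α) (f g : α → List β)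
    (h : ∀ x ∈ l, f x = g x) : l.flatMap f = l.flatMap g := by
  induction l with
  | nil => rfl
  | cons a t ih =>
    simp only [List.flatMap_cons, h a (List.mem_cons_self ..),
      ih (fun x hx => h x (List.mem_cons_of_mem _ hx))]

-- insertBy walks past a prefix it does not go before
theorem pvInsertSkip (p : Int × String) (ys zs : List (Int × String))
    (h : ∀ y ∈ ys, ¬ p.1 < y.1) :
    PySem.List.insertBy (fun a b => decide (a.1 < b.1)) p (ys ++ zs)
      = ys ++ PySem.List.insertBy (fun a b => decide (a.1 < b.1)) p zs := by
  induction ys with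
  | nil => rfl
  | cons y t ih =>
    have hy : ¬ p.1 < y.1 := h y (List.mem_cons_self ..)
    simp only [List.cons_append, PySem.List.insertBy, decide_eq_true_eq]
    rw [if_neg hy, ih (fun z hz => h z (List.mem_cons_of_mem _ hz))]

-- inserting into a key-grouped list appends to the group of the key
theorem pvInsertGrouped (p : Int × String) (ks : List Int) (g : Int → List (Int × String))
    (hpure : ∀ i ∈ ks, ∀ q ∈ g i, q.1 = i) (hks : ks.Pairwise (· < ·)) (hp : p.1 ∈ ks) :
    PySem.List.insertBy (fun a b => decide (a.1 < b.1)) p (ks.flatMap g)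
      = ks.flatMap (fun i => if i = p.1 then g i ++ [p] else g i) := by
  induction ks with
  | nil => cases hp
  | cons k ks' ih =>
    have hlt : ∀ i ∈ ks', k < i := fun i hi => (List.pairwise_cons.mp hks).1 i hi
    have hks' : ks'.Pairwise (· < ·) := (List.pairwise_cons.mp hks).2
    have hpure' : ∀ i ∈ ks', ∀ q ∈ g i, q.1 = i :=
      fun i hi => hpure i (List.mem_cons_of_mem _ hi)
    simp only [List.flatMap_cons]
    by_cases hk : p.1 = k
    · -- p belongs to the first group
      rw [pvInsertSkip p (g k) _ (fun y hy => by
        rw [hpure k (List.mem_cons_self ..) y hy, hk]; exact lt_irrefl _)]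
      rw [if_pos hk.symm]
      have hrest : ks'.flatMap (fun i => if i = p.1 then g i ++ [p] else g i) = ks'.flatMap g := by
        refine pvFlatMapCongr _ _ _ (fun i hi => ?_)
        rw [if_neg]
        intro he; rw [← he] at hk; exact absurd (hk ▸ hlt i hi) (lt_irrefl i)
      rw [hrest]
      cases hz : ks'.flatMap g with
      | nil => simp [PySem.List.insertBy]
      | cons y ys =>
        have hy : y ∈ ks'.flatMap g := by rw [hz]; exact List.mem_cons_self ..
        obtain ⟨i, hi, hyi⟩ := List.mem_flatMap.mp hy
        have : p.1 < y.1 := by rw [hpure' i hi y hyi, hk]; exact hlt i hi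
        simp only [PySem.List.insertBy, decide_eq_true_eq]
        rw [if_pos this]
        simp
    · -- p belongs to a later group
      have hp' : p.1 ∈ ks' := by
        cases List.mem_cons.mp hp with
        | inl h => exact absurd h hk
        | inr h => exact h
      have hkp : k < p.1 := hlt _ hp'
      rw [pvInsertSkip p (g k) _ (fun y hy => by
        rw [hpure k (List.mem_cons_self ..) y hy]; omega)]
      rw [ih hpure' hks' hp', if_neg (fun he => hk he.symm)]

-- folding insertions into a grouped list distributes over the groups
theorem pvFoldGrouped (xs : List (Int × String)) (ks : List Int)
    (hks : ks.Pairwise (· < ·)) (hxs : ∀ p ∈ xs, p.1 ∈ ks) :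
    ∀ (g : Int → List (Int × String)), (∀ i ∈ ks, ∀ q ∈ g i, q.1 = i) →
    xs.foldl (fun acc p => PySem.List.insertBy (fun a b => decide (a.1 < b.1)) p acc) (ks.flatMap g)
      = ks.flatMap (fun i => g i ++ xs.filter (fun p => p.1 == i)) := by
  induction xs with
  | nil =>
    intro g _
    simp only [List.foldl_nil, List.filter_nil]
    exact (pvFlatMapCongr _ _ _ (fun i _ => by simp)).symm
  | cons p t ih =>
    intro g hpure
    have hp : p.1 ∈ ks := hxs p (List.mem_cons_self ..)
    simp only [List.foldl_cons]
    rw [pvInsertGrouped p ks g hpure hks hp]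
    rw [ih (fun q hq => hxs q (List.mem_cons_of_mem _ hq))
        (fun i => if i = p.1 then g i ++ [p] else g i)
        (fun i hi q hq => by
          have hq' : q ∈ if i = p.1 then g i ++ [p] else g i := hq
          by_cases he : i = p.1
          · rw [if_pos he] at hq'
            cases List.mem_append.mp hq' with
            | inl h => exact hpure i hi q h
            | inr h => simp at h; rw [h, he]
          · rw [if_neg he] at hq'; exact hpure i hi q hq')]
    refine pvFlatMapCongr _ _ _ (fun i _ => ?_)
    rw [List.filter_cons]
    by_cases he : i = p.1
    · subst he
      simp
    · have hne : ¬ p.1 = i := fun h => he h.symm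
      simp [he, hne]

-- stable sort by key = concatenation of the key groups in key order
theorem pvSortedGrouped (xs : List (Int × String)) (ks : List Int)
    (hks : ks.Pairwise (· < ·)) (hxs : ∀ p ∈ xs, p.1 ∈ ks) :
    PySem.List.sorted xs (fun t => t.1) false = ks.flatMap (fun i => xs.filter (fun p => p.1 == i)) := by
  have h0 : (ks.flatMap (fun _ => ([] : List (Int × String)))) = [] := by simp
  have := pvFoldGrouped xs ks hks hxs (fun _ => []) (fun _ _ _ hq => absurd hq (List.not_mem_nil))
  rw [h0] at this
  rw [PySem.List.sorted_eq_foldl_insertBy]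
  rw [this]
  exact pvFlatMapCongr _ _ _ (fun i _ => by simp)

-- one rank's slice of the pair list is A's filter for that phrase
theorem pvRank (cl : List String) (i : Int) (si : String)
    (hsel : pvLowered.filter (fun rp => rp.1 == i) = [(i, si)]) :
    ((pvPairs cl).filter (fun q => q.1 == i)).map (fun q => q.2)
      = cl.filter (fun f => PySem.Str.isIn si (PySem.Str.lower f)) := by
  induction cl with
  | nil => rfl
  | cons f t ih =>
    simp only [pvPairs, List.flatMap_cons] at *
    rw [List.filter_append, List.map_append, ih, List.filter_cons]
    have hcomm : (pvLowered.filter (fun rp => PySem.Str.isIn rp.2 (PySem.Str.lower f))).filter (fun rp => rp.1 == i)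
        = (pvLowered.filter (fun rp => rp.1 == i)).filter (fun rp => PySem.Str.isIn rp.2 (PySem.Str.lower f)) := by
      simp only [List.filter_filter]
      exact List.filter_congr (fun x _ => Bool.and_comm _ _)
    have hmf : ((pvLowered.filter (fun rp => PySem.Str.isIn rp.2 (PySem.Str.lower f))).map (fun rp => (rp.1, f))).filter (fun q => q.1 == i)
        = ((pvLowered.filter (fun rp => PySem.Str.isIn rp.2 (PySem.Str.lower f))).filter (fun rp => rp.1 == i)).map (fun rp => (rp.1, f)) := by
      rw [List.filter_map]; rfl
    rw [hmf, hcomm, hsel]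
    by_cases hc : PySem.Str.isIn si (PySem.Str.lower f) = true
    · rw [if_pos hc]
      simp only [List.filter_cons, List.filter_nil]
      rw [if_pos (by simpa using hc)]
      simp
    · rw [if_neg hc]
      simp only [List.filter_cons, List.filter_nil]
      rw [if_neg (by simpa using hc)]
      simp

-- B's sorted pair list, projected to filings, is A's phrase-major priority list
theorem pvPriorityB (cl : List String) :
    (PySem.List.sorted (pvPairs cl) (fun t => t.1) false).map (fun t => t.2) = pvPriority cl := by
  have hkeys : ∀ p ∈ pvPairs cl, p.1 ∈ ([0, 1, 2, 3, 4] : List Int) := by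
    intro p hp
    obtain ⟨f, _, hf⟩ := List.mem_flatMap.mp hp
    obtain ⟨rp, hrp, he⟩ := List.mem_map.mp hf
    have hrl : rp ∈ pvLowered := List.mem_of_mem_filter hrp
    have : ∀ rp ∈ pvLowered, rp.1 ∈ ([0, 1, 2, 3, 4] : List Int) := by decide
    rw [← he]
    exact this rp hrl
  rw [pvSortedGrouped (pvPairs cl) [0, 1, 2, 3, 4] (by decide) hkeys]
  simp only [List.flatMap_cons, List.flatMap_nil, List.map_append, List.append_nil]
  rw [pvRank cl 0 "petition to probate will in solemn form" (by decide),
      pvRank cl 1 "petition to probate will in common form" (by decide),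
      pvRank cl 2 "petition for letters of administration" (by decide),
      pvRank cl 3 "petition for temporary letters of administration" (by decide),
      pvRank cl 4 "petition for order declaring no administration necessary" (by decide)]
  have h0 : PySem.Str.lower "Petition To Probate Will In Solemn Form" = "petition to probate will in solemn form" := by decide
  have h1 : PySem.Str.lower "Petition to Probate Will in Common Form" = "petition to probate will in common form" := by decide
  have h2 : PySem.Str.lower "Petition For Letters Of Administration" = "petition for letters of administration" := by decide
  have h3 : PySem.Str.lower "Petition For Temporary Letters Of Administration" = "petition for temporary letters of administration" := by decide
  have h4 : PySem.Str.lower "Petition For Order Declaring No Administration Necessary" = "petition for order declaring no administration necessary" := by decide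
  simp only [pvPriority, PRIORITY_FILINGS, List.flatMap_cons, List.flatMap_nil, List.append_nil,
    h0, h1, h2, h3, h4]

-- ---------- the dedup tail (A's membership loop vs dict.fromkeys + filter) ----------

def pvTail (init : List String) : List String → List String
  | [] => []
  | f :: t => if f ∈ init then pvTail init t else f :: pvTail (init ++ [f]) t

theorem pvFoldTail (cl : List String) : ∀ init,
    cl.foldl (fun ord f => if f ∈ ord then ord else ord ++ [f]) init = init ++ pvTail init cl := by
  induction cl with
  | nil => intro init; simp [pvTail]
  | cons f t ih =>
    intro init
    simp only [List.foldl_cons, pvTail]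
    by_cases h : f ∈ init
    · rw [if_pos h, if_pos h, ih]
    · rw [if_neg h, if_neg h, ih, List.append_assoc]
      rfl

theorem pvTailNotMem (cl : List String) : ∀ s x, x ∈ pvTail s cl → x ∉ s := by
  induction cl with
  | nil => intro s x hx; cases hx
  | cons f t ih =>
    intro s x hx
    simp only [pvTail] at hx
    by_cases h : f ∈ s
    · rw [if_pos h] at hx; exact ih s x hx
    · rw [if_neg h] at hx
      cases List.mem_cons.mp hx with
      | inl he => rw [he]; exact h
      | inr he =>
        have := ih (s ++ [f]) x he
        intro hxs; exact this (List.mem_append.mpr (Or.inl hxs))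

theorem pvTailFilter (cl : List String) : ∀ (init s : List String), (∀ x ∈ s, x ∈ init) →
    pvTail init cl = (pvTail s cl).filter (fun x => !(init.contains x)) := by
  induction cl with
  | nil => intro init s _; rfl
  | cons f t ih =>
    intro init s hsub
    simp only [pvTail]
    by_cases hs : f ∈ s
    · have hi : f ∈ init := hsub f hs
      rw [if_pos hs, if_pos hi]
      exact ih init s hsub
    · rw [if_neg hs]
      by_cases hi : f ∈ init
      · rw [if_pos hi, List.filter_cons]
        rw [if_neg (by simp [hi])]
        rw [ih init (s ++ [f]) (fun x hx => by
          cases List.mem_append.mp hx with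
          | inl h => exact hsub x h
          | inr h => simp at h; rw [h]; exact hi)]
      · rw [if_neg hi, List.filter_cons]
        have : (!(init.contains f)) = true := by simp [hi]
        rw [if_pos this]
        congr 1
        rw [ih (init ++ [f]) (s ++ [f]) (fun x hx => by
          cases List.mem_append.mp hx with
          | inl h => exact List.mem_append.mpr (Or.inl (hsub x h))
          | inr h => exact List.mem_append.mpr (Or.inr h))]
        refine List.filter_congr (fun x hx => ?_)
        have hxf : x ≠ f := by
          intro he
          have := pvTailNotMem t (s ++ [f]) x hx
          exact this (List.mem_append.mpr (Or.inr (by simp [he])))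
        simp [List.mem_append, hxf]

theorem pvDedupEqTail (cl : List String) : PySem.List.dedup cl = pvTail [] cl := by
  have hfun : (fun (s : List String) x => PySem.Set.add s x)
      = (fun (ord : List String) f => if f ∈ ord then ord else ord ++ [f]) := by
    funext s x
    simp [PySem.Set.add, List.contains_eq_mem]
  have : PySem.List.dedup cl
      = cl.foldl (fun ord f => if f ∈ ord then ord else ord ++ [f]) [] := by
    simp only [PySem.List.dedup, PySem.Set.ofList, PySem.Set.empty, ← hfun]
  rw [this, pvFoldTail]
  simp

-- A's append-if-new loop seeded with the priority list = priority ++ filtered ordered dedup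
theorem pvOrderedEq (cl priority : List String) :
    cl.foldl (fun ord f => if f ∈ ord then ord else ord ++ [f]) priority
      = priority ++ (PySem.List.dedup cl).filter (fun f => !(priority.contains f)) := by
  rw [pvFoldTail, pvDedupEqTail]
  congr 1
  exact pvTailFilter cl priority [] (fun x hx => absurd hx (List.not_mem_nil))

-- B's trailing slice of the padded list = A's slice-then-pad
theorem pvPadEq (ord : List String) :
    PySem.List.slice (ord ++ List.replicate 10 "") none (some 10)
      = PySem.List.slice ord none (some 10) ++ List.replicate (10 - ord.length) "" := by
  rw [PySem.List.slice_to, PySem.List.slice_to]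
  · have h10 : ((10 : Int)).toNat = 10 := rfl
    rw [h10, List.take_append, List.take_replicate]
    congr 2
    omega
  · norm_num
  · norm_num

-- port-shaped restatement of pvPriorityB (pvPairs/pvLowered unfolded, as the port writes them)
theorem pvPriorityB' (cl : List String) :
    (PySem.List.sorted (cl.flatMap (fun f =>
        (((PySem.List.enumerate PRIORITY_FILINGS).map (fun rp => (rp.1, PySem.Str.lower rp.2))).filter
          (fun rp => PySem.Str.isIn rp.2 (PySem.Str.lower f))).map (fun rp => (rp.1, f))))
      (fun t => t.1) false).map (fun t => t.2) = pvPriority cl :=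
  pvPriorityB cl

def pvRest (clean priority : List String) : List String :=
  let ordered := clean.foldl (fun ord f => if f ∈ ord then ord else ord ++ [f]) priority
  PySem.List.slice ordered none (some 10) ++ List.replicate (10 - ordered.length) ""

theorem pvRestEq (clean priority : List String) :
    pvRest clean priority
      = PySem.List.slice
          ((priority ++ (PySem.List.dedup clean).filter (fun f => !(priority.contains f)))
            ++ List.replicate 10 "") none (some 10) := by
  unfold pvRest
  rw [pvOrderedEq, ← pvPadEq]

theorem pvCharA (filings : List String) :
    analyze_and_sort_filings filings
      = (pvTestate (pvClean filings), (pvPriority (pvClean filings)).headD "",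
         pvRest (pvClean filings) (pvPriority (pvClean filings))) := by
  unfold analyze_and_sort_filings
  simp only [pvOuterA0 _ _ (pvCleanNe filings)]
  rfl

theorem pvCharB (filings : List String) :
    analyze_and_sort_filings_alt filings
      = (pvTestate (pvClean filings),
         (match pvPriority (pvClean filings) with | [] => "" | x :: _ => x : String),
         pvRest (pvClean filings) (pvPriority (pvClean filings))) := by
  unfold analyze_and_sort_filings_alt
  rw [pvRestEq]
  simp only [pvPriorityB']
  rfl

-- ===== VERDICT (by name: the statement is the Claim_ definition above) =====
theorem analyze_and_sort_filings_spec : Claim_equal_analyze_and_sort_filings := by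
  intro filings _
  unfold Spec_analyze_and_sort_filings
  rw [pvCharA, pvCharB]
  cases hL : pvPriority (pvClean filings) <;> rfl
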